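-- pv_equiv track=rewrite | github.com/sust-cs-uob/eam-data-tools | src/table_data_reader/id_handler.py | check_for_duplicate_ids
-- ===== SOURCE A (Python) =====
-- def check_for_duplicate_ids(id_map) -> bool:
--     """
--     Checks for duplicate ids in the map
--     :param id_map: The id_map generated by build_id_dict()
--     :return: True if duplicate non-null id's exist, false otherwise
--     """
--     used_ids = set()
--     for sheet in id_map.keys():
--         for row in id_map[sheet].keys():
--             current_id = id_map[sheet][row]
--             if current_id is not None and current_id in used_ids:
--                 return True
--             used_ids.add(current_id)
--     return False
-- ===== SOURCE B (Python) =====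
-- def check_for_duplicate_ids(id_map) -> bool:
--     """Gather all non-null ids into a flat list, then compare its length with
--     the size of its set: duplicates exist iff deduplication shrinks it."""
--     ids = [id_map[s][r] for s in id_map for r in id_map[s] if id_map[s][r] is not None]
--     return len(ids) != len(set(ids))
-- ===== Notes on version B (the rewrite author's own statement) =====
-- stated objective: simpler
-- what changed: Replaces A's single-pass early-exit scan that maintains an incremental seen-set with a two-phase decomposition: flatten all non-null ids into one list by a comprehension, then detect duplicates by comparing the list's length with its set's cardinality.
import Mathlib
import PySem

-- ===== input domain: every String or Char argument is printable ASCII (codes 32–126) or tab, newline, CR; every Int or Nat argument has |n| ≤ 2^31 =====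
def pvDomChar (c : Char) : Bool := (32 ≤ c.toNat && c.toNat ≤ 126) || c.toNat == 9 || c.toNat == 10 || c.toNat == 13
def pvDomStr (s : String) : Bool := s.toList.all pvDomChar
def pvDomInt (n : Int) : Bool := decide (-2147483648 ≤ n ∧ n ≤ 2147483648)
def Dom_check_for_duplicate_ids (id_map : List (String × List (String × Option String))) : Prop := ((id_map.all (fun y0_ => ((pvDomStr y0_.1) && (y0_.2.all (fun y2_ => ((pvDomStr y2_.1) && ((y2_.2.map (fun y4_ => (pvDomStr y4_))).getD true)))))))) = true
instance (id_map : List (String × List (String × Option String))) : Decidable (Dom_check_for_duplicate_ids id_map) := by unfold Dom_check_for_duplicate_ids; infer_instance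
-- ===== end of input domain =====

-- B replaces A's early-exit scan with a seen-set by a two-phase gather of all
-- non-null ids followed by a length-vs-set-cardinality comparison (objective: simpler).


-- ===== PORT A =====
-- inner loop 'for row in id_map[sheet].keys(): …' with the early 'return True'
-- modelled as: none = the function returns True, some u = loop finished with seen-set u
def pvChkRowsA (used : PySem.Set (Option String)) :
    List (String × Option String) → Option (PySem.Set (Option String))
  | [] => some used
  | (_, current_id) :: rest =>
      if current_id.isSome && PySem.Set.contains used current_id then none
      else pvChkRowsA (PySem.Set.add used current_id) rest

-- outer loop 'for sheet in id_map.keys(): …'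
def pvChkSheetsA (used : PySem.Set (Option String)) :
    List (String × List (String × Option String)) → Bool
  | [] => false
  | (_, rows) :: rest =>
      match pvChkRowsA used rows with
      | none => true
      | some used' => pvChkSheetsA used' rest

def check_for_duplicate_ids (id_map : List (String × List (String × Option String))) : Bool :=
  pvChkSheetsA PySem.Set.empty id_map

-- ===== PORT B =====
def check_for_duplicate_ids_alt (id_map : List (String × List (String × Option String))) : Bool :=
  let ids : List String := id_map.flatMap (fun s => s.2.filterMap (fun r => r.2))
  decide (ids.length ≠ (PySem.Set.ofList ids).length)

-- ===== PRECONDITION & SPEC =====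
def Spec_check_for_duplicate_ids (id_map : List (String × List (String × Option String))) (out : Bool) : Prop := out = check_for_duplicate_ids_alt id_map
instance (id_map : List (String × List (String × Option String))) (out : Bool) : Decidable (Spec_check_for_duplicate_ids id_map out) := by unfold Spec_check_for_duplicate_ids; infer_instance

-- ===== CLAIM (what is proved, stated in full; the proofs are below) =====
def Claim_equal_check_for_duplicate_ids : Prop := ∀ (id_map : List (String × List (String × Option String))), Dom_check_for_duplicate_ids id_map → Spec_check_for_duplicate_ids id_map (check_for_duplicate_ids id_map)

-- ===== LEMMAS AND PROOFS =====

-- proof-only helper: A's scan fused over the concatenation of all rows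
def pvScan (used : PySem.Set (Option String)) : List (String × Option String) → Bool
  | [] => false
  | (_, cid) :: rest =>
      if cid.isSome && PySem.Set.contains used cid then true
      else pvScan (PySem.Set.add used cid) rest

theorem pvScan_append (rows : List (String × Option String))
    (used : PySem.Set (Option String)) (tail : List (String × Option String)) :
    pvScan used (rows ++ tail) =
      match pvChkRowsA used rows with
      | none => true
      | some u => pvScan u tail := by
  induction rows generalizing used with
  | nil => rfl
  | cons hd tl ih =>
    obtain ⟨k, cid⟩ := hd
    simp only [List.cons_append, pvScan, pvChkRowsA]
    split
    · rfl
    · exact ih _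

theorem pvChkSheetsA_eq_scan (sheets : List (String × List (String × Option String)))
    (used : PySem.Set (Option String)) :
    pvChkSheetsA used sheets = pvScan used (sheets.flatMap (fun s => s.2)) := by
  induction sheets generalizing used with
  | nil => rfl
  | cons hd tl ih =>
    obtain ⟨k, rows⟩ := hd
    simp only [pvChkSheetsA, List.flatMap_cons, pvScan_append]
    cases pvChkRowsA used rows with
    | none => rfl
    | some u => exact ih u

theorem pvScan_char (l : List (String × Option String)) (used : PySem.Set (Option String)) :
    pvScan used l =
      decide (¬ ((l.filterMap (fun r => r.2)).Nodup ∧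
        ∀ v ∈ l.filterMap (fun r => r.2), some v ∉ used)) := by
  induction l generalizing used with
  | nil => simp [pvScan]
  | cons hd tl ih =>
    obtain ⟨k, cid⟩ := hd
    cases cid with
    | none =>
      have hmem : ∀ v : String, some v ∈ PySem.Set.add used none ↔ some v ∈ used := by
        intro v
        rw [PySem.Set.mem_add]
        simp
      have hstep : pvScan used ((k, none) :: tl) = pvScan (PySem.Set.add used none) tl := by
        simp only [pvScan, Option.isSome_none, Bool.false_and, Bool.false_eq_true, if_false]
      have hfm : List.filterMap (fun r => r.2) ((k, (none : Option String)) :: tl) =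
          List.filterMap (fun r => r.2) tl := rfl
      rw [hstep, ih, hfm, decide_eq_decide]
      exact not_congr (and_congr_right fun _ =>
        forall_congr' fun v => imp_congr Iff.rfl (not_congr (hmem v)))
    | some v =>
      by_cases h : some v ∈ used
      · have hc : PySem.Set.contains used (some v) = true := List.contains_iff_mem.mpr h
        simp [pvScan, h]
      · have hc : PySem.Set.contains used (some v) = false := by
          rw [Bool.eq_false_iff]
          intro hcon
          exact h (List.contains_iff_mem.mp hcon)
        have hstep : pvScan used ((k, some v) :: tl) =
            pvScan (PySem.Set.add used (some v)) tl := by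
          simp only [pvScan, hc, Option.isSome_some, Bool.true_and, Bool.false_eq_true,
            if_false]
        have hmem : ∀ w : String, some w ∈ PySem.Set.add used (some v) ↔
            some w ∈ used ∨ w = v := by
          intro w
          rw [PySem.Set.mem_add]
          simp
        rw [hstep, ih]
        simp only [hmem, List.filterMap_cons, List.nodup_cons, List.mem_cons,
          decide_eq_decide, not_iff_not]
        constructor
        · rintro ⟨hnd, hfa⟩
          refine ⟨⟨fun hv => (not_or.mp (hfa v hv)).2 rfl, hnd⟩, ?_⟩
          intro w hw
          cases hw with
          | inl he => exact he ▸ h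
          | inr hw => exact (not_or.mp (hfa w hw)).1
        · rintro ⟨⟨hv, hnd⟩, hfa⟩
          refine ⟨hnd, fun w hw => not_or.mpr ⟨hfa w (Or.inr hw), fun he => hv (he ▸ hw)⟩⟩

theorem pvLen_ofList (xs : List String) :
    (PySem.Set.ofList xs).length = xs.length ↔ xs.Nodup := by
  have hfin : (PySem.Set.ofList xs).toFinset = xs.toFinset := by
    ext w
    simp [List.mem_toFinset, PySem.Set.mem_ofList]
  have hlen : (PySem.Set.ofList xs).length = xs.toFinset.card := by
    rw [← hfin, List.toFinset_card_of_nodup (PySem.Set.nodup_ofList xs)]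
  rw [hlen, List.card_toFinset]
  constructor
  · intro hl
    exact List.dedup_eq_self.mp ((List.dedup_sublist xs).eq_of_length hl)
  · intro h
    rw [List.dedup_eq_self.mpr h]

-- ===== VERDICT (by name: the statement is the Claim_ definition above) =====
theorem check_for_duplicate_ids_spec : Claim_equal_check_for_duplicate_ids := by
  intro id_map _
  unfold Spec_check_for_duplicate_ids check_for_duplicate_ids check_for_duplicate_ids_alt
  rw [pvChkSheetsA_eq_scan, pvScan_char]
  have hflat : (List.flatMap (fun s => s.2) id_map).filterMap (fun r => r.2) =
      id_map.flatMap (fun s => s.2.filterMap (fun r => r.2)) := by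
    rw [List.filterMap_flatMap]
  simp only [hflat, PySem.Set.empty, List.not_mem_nil, not_false_iff, implies_true,
    and_true, decide_eq_decide, ne_eq]
  rw [← pvLen_ofList]
  omega
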